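-- pv_equiv track=rewrite | github.com/MichaelVered/ResolveLight | learning_agent/exception_parser.py | _split_exception_blocks
-- ===== SOURCE A (Python) =====
-- from typing import List, Dict, Optional
--
-- def _split_exception_blocks(content: str) -> List[str]:
--     """Split content into individual exception blocks."""
--     lines = content.strip().split('\n')
--     blocks = []
--     current_block = []
--
--     for line in lines:
--         if line.startswith("QUEUE:") and current_block:
--             # Start of a new exception, save the previous one
--             blocks.append('\n'.join(current_block))
--             current_block = [line]
--         else:
--             current_block.append(line)
--
--     # Add the last block
--     if current_block:
--         blocks.append('\n'.join(current_block))
--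
--     return blocks
-- ===== SOURCE B (Python) =====
-- def _split_exception_blocks(content: str):
--     """Split content into individual exception blocks."""
--     lines = content.strip().split('\n')
--     bounds = [0] + [i for i, ln in enumerate(lines) if i > 0 and ln.startswith("QUEUE:")] + [len(lines)]
--     return ['\n'.join(lines[s:e]) for s, e in zip(bounds, bounds[1:])]
-- ===== Notes on version B (the rewrite author's own statement) =====
-- stated objective: alternative
-- what changed: Replaces the running-accumulator single pass with an index-building pass (boundary positions of QUEUE: lines beyond index 0) followed by a slicing pass over consecutive boundary pairs.
import Mathlib
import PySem

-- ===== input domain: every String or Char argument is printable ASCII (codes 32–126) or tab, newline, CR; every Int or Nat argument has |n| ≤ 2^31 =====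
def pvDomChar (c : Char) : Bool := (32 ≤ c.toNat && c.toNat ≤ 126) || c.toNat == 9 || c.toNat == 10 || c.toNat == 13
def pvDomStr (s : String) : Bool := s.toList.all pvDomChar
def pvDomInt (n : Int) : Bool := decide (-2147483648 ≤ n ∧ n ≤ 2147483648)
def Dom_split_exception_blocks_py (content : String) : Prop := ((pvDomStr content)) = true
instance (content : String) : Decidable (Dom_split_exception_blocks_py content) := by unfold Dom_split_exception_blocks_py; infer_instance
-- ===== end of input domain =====

-- B computes the boundary indices first (QUEUE: lines beyond index 0) and then slices, instead of A's running-accumulator pass; same values everywhere.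

-- ===== PORT A =====
def split_exception_blocks_py (content : String) : List String :=
  let lines := (PySem.Str.split? (PySem.Str.strip content) "\n").getD []   -- sep ≠ "", so never none
  let st := lines.foldl (fun (st : List String × List String) line =>
      if PySem.Str.startswith line "QUEUE:" && !st.2.isEmpty then
        (st.1 ++ [PySem.Str.join "\n" st.2], [line])
      else
        (st.1, st.2 ++ [line])) (([], []) : List String × List String)
  if st.2.isEmpty then st.1 else st.1 ++ [PySem.Str.join "\n" st.2]

-- ===== PORT B =====
def split_exception_blocks_py_alt (content : String) : List String :=
  let lines := (PySem.Str.split? (PySem.Str.strip content) "\n").getD []   -- sep ≠ "", so never none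
  let bounds : List Int :=
    [0] ++ ((PySem.List.enumerate lines 0).filter
              (fun p => decide (0 < p.1) && PySem.Str.startswith p.2 "QUEUE:")).map (·.1)
        ++ [(lines.length : Int)]
  (bounds.zip bounds.tail).map (fun p => PySem.Str.join "\n" (PySem.List.slice lines (some p.1) (some p.2)))

-- ===== PRECONDITION & SPEC =====
def Spec_split_exception_blocks_py (content : String) (out : List String) : Prop := out = split_exception_blocks_py_alt content
instance (content : String) (out : List String) : Decidable (Spec_split_exception_blocks_py content out) := by unfold Spec_split_exception_blocks_py; infer_instance

-- ===== CLAIM (what is proved, stated in full; the proofs are below) =====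
def Claim_equal_split_exception_blocks_py : Prop := ∀ (content : String), Dom_split_exception_blocks_py content → Spec_split_exception_blocks_py content (split_exception_blocks_py content)

-- ===== LEMMAS AND PROOFS =====

-- does this line open a new block?
def qline (s : String) : Bool := PySem.Str.startswith s "QUEUE:"

-- the common specification: the groups of lines both programs join with '\n'
def chunks : List String → List (List String)
  | [] => []
  | l :: rest =>
      (l :: rest.takeWhile (fun s => !qline s)) :: chunks (rest.dropWhile (fun s => !qline s))
termination_by ls => ls.length
decreasing_by
  simpa using Nat.lt_succ_of_le (List.Sublist.length_le (List.dropWhile_sublist _))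

-- boundary indices (as Nats, starting offset s): positions of qline elements
def nf : List String → Nat → List Nat
  | [], _ => []
  | x :: xs, s => if qline x then s :: nf xs (s + 1) else nf xs (s + 1)

-- Nat-level version of B's slicing pass
def natPayoff (ls : List String) (bs : List Nat) : List String :=
  (bs.zip bs.tail).map (fun p => PySem.Str.join "\n" ((ls.drop p.1).take (p.2 - p.1)))

theorem nf_shift (xs : List String) (s k : Nat) :
    nf xs (s + k) = (nf xs s).map (· + k) := by
  induction xs generalizing s with
  | nil => simp [nf]
  | cons x xs ih =>
      simp only [nf]
      have : s + k + 1 = (s + 1) + k := by omega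
      by_cases h : qline x <;> simp [h, this, ih]

theorem nf_append (xs ys : List String) (s : Nat) :
    nf (xs ++ ys) s = nf xs s ++ nf ys (s + xs.length) := by
  induction xs generalizing s with
  | nil => simp [nf]
  | cons x xs ih =>
      simp only [nf, List.cons_append, List.length_cons]
      have : s + (xs.length + 1) = (s + 1) + xs.length := by omega
      by_cases h : qline x <;> simp [h, this, ih]

theorem nf_of_none (xs : List String) (s : Nat) (h : ∀ x ∈ xs, qline x = false) :
    nf xs s = [] := by
  induction xs generalizing s with
  | nil => simp [nf]
  | cons x xs ih =>
      simp only [nf]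
      rw [if_neg (by simp [h x (by simp)])]
      exact ih _ (fun x hx => h x (by simp [hx]))

-- bridge: B's enumerate/filter pass computes nf (cast to Int)
theorem enum_filter_eq_nf (xs : List String) (s : Nat) (hs : 1 ≤ s) :
    ((PySem.List.enumerate xs (s : Int)).filter
        (fun p => decide (0 < p.1) && PySem.Str.startswith p.2 "QUEUE:")).map (·.1)
      = (nf xs s).map Int.ofNat := by
  induction xs generalizing s with
  | nil => simp [nf, PySem.List.enumerate_nil]
  | cons x xs ih =>
      rw [PySem.List.enumerate_cons, List.filter_cons]
      have h0 : (0 : Int) < (s : Int) := by exact_mod_cast hs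
      have hd : decide ((0 : Int) < (s : Int)) = true := decide_eq_true h0
      have hcast : (s : Int) + 1 = ((s + 1 : Nat) : Int) := by push_cast; ring
      have ih' := ih (s + 1) (by omega)
      by_cases h : qline x
      · have hq : PySem.Str.startswith x "QUEUE:" = true := h
        simp only [hd, hq, Bool.and_self, if_true, List.map_cons]
        rw [hcast, ih']
        simp [nf, h]
      · have hq : PySem.Str.startswith x "QUEUE:" = false := by
          simpa [qline] using h
        simp only [hd, hq, Bool.and_false, Bool.false_eq_true, if_false]
        rw [hcast, ih']
        simp [nf, h]

-- cast: B's Int slicing pass equals the Nat-level natPayoff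
theorem payoff_cast (ls : List String) : ∀ (bs : List Nat),
    (((bs.map Int.ofNat).zip ((bs.map Int.ofNat).tail)).map
        (fun p => PySem.Str.join "\n" (PySem.List.slice ls (some p.1) (some p.2))))
      = natPayoff ls bs
  | [] => by simp [natPayoff]
  | [a] => by simp [natPayoff]
  | a :: b :: bs => by
      have ih := payoff_cast ls (b :: bs)
      unfold natPayoff at ih ⊢
      simp only [List.map_cons, List.tail_cons, List.zip_cons_cons, List.map_cons] at ih ⊢
      rw [List.cons.injEq]
      constructor
      · simp [Int.ofNat_eq_natCast, PySem.List.slice_natCast]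
      · exact ih

theorem payoff_shift (ls : List String) (k : Nat) : ∀ (bs : List Nat),
    natPayoff ls (bs.map (· + k)) = natPayoff (ls.drop k) bs
  | [] => by simp [natPayoff]
  | [a] => by simp [natPayoff]
  | a :: b :: bs => by
      have ih := payoff_shift ls k (b :: bs)
      unfold natPayoff at ih ⊢
      simp only [List.map_cons, List.tail_cons, List.zip_cons_cons, List.map_cons] at ih ⊢
      rw [List.cons.injEq]
      constructor
      · have h1 : ls.drop (a + k) = (ls.drop k).drop a := by rw [List.drop_drop]; ring_nf
        have h2 : b + k - (a + k) = b - a := by omega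
        simp [h1, h2]
      · exact ih

theorem natPayoff_cons (ls : List String) (a b : Nat) (bs : List Nat) :
    natPayoff ls (a :: b :: bs)
      = PySem.Str.join "\n" ((ls.drop a).take (b - a)) :: natPayoff ls (b :: bs) := by
  simp [natPayoff]

theorem dropWhile_head_false {A : Type} (p : A → Bool) (l : List A) (x : A) (xs : List A)
    (h : l.dropWhile p = x :: xs) : p x = false := by
  have := List.head_dropWhile_not (p := p) (l := l) (by simp [h])
  simpa [h] using this

-- main B lemma: the slicing pass over boundary indices yields the joined chunks
theorem natPayoff_eq_chunks (n : Nat) : ∀ (ls : List String), ls.length ≤ n → ls ≠ [] →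
    natPayoff ls (0 :: nf ls.tail 1 ++ [ls.length])
      = (chunks ls).map (PySem.Str.join "\n") := by
  induction n with
  | zero =>
      intro ls hlen hne
      cases ls with
      | nil => exact absurd rfl hne
      | cons l rest => simp at hlen
  | succ n ih =>
      intro ls hlen hne
      obtain ⟨l, rest, rfl⟩ := List.exists_cons_of_ne_nil hne
      have hsplit : rest.takeWhile (fun s => !qline s) ++ rest.dropWhile (fun s => !qline s) = rest :=
        List.takeWhile_append_dropWhile
      have hpre : nf (rest.takeWhile (fun s => !qline s)) 1 = [] :=
        nf_of_none _ _ (fun x hx => by simpa using List.mem_takeWhile_imp hx)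
      have hnf : nf rest 1
          = nf (rest.dropWhile (fun s => !qline s)) (1 + (rest.takeWhile (fun s => !qline s)).length) := by
        conv_lhs => rw [← hsplit]
        rw [nf_append, hpre]
        simp
      have hlenrest : (rest.takeWhile (fun s => !qline s)).length
          + (rest.dropWhile (fun s => !qline s)).length = rest.length := by
        rw [← List.length_append, hsplit]
      have hdropKey : ∀ m, (rest.takeWhile (fun s => !qline s)).length = m →
          List.drop m rest = rest.dropWhile (fun s => !qline s) := by
        intro m hm
        conv_lhs => rw [← hsplit]
        rw [List.drop_left' hm]
      have htakeKey : ∀ m, (rest.takeWhile (fun s => !qline s)).length = m →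
          List.take m rest = rest.takeWhile (fun s => !qline s) := by
        intro m hm
        conv_lhs => rw [← hsplit]
        rw [List.take_left' hm]
      have hchunks : chunks (l :: rest)
          = (l :: rest.takeWhile (fun s => !qline s)) :: chunks (rest.dropWhile (fun s => !qline s)) := by
        rw [chunks]
      cases hpost : rest.dropWhile (fun s => !qline s) with
      | nil =>
          have hrest : rest.takeWhile (fun s => !qline s) = rest := by
            conv_rhs => rw [← hsplit]
            simp [hpost]
          rw [List.tail_cons, hnf, hpost]
          simp only [nf, List.nil_append, List.cons_append]
          rw [natPayoff_cons]
          simp [natPayoff, hchunks, hpost, chunks, hrest]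
      | cons p ps =>
          have hq : qline p = true := by
            have := dropWhile_head_false (fun s => !qline s) rest p ps hpost
            simpa using this
          have hklen : (l :: rest).length
              = (rest.dropWhile (fun s => !qline s)).length + ((rest.takeWhile (fun s => !qline s)).length + 1) := by
            simp only [List.length_cons]
            omega
          have hshift : nf ps ((rest.takeWhile (fun s => !qline s)).length + 1 + 1)
              = (nf ps 1).map (· + ((rest.takeWhile (fun s => !qline s)).length + 1)) := by
            have := nf_shift ps 1 ((rest.takeWhile (fun s => !qline s)).length + 1)
            rw [← this]
            congr 1
            omega
          have hbounds : (0 : Nat) :: nf rest 1 ++ [(l :: rest).length]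
              = 0 :: ((0 :: nf ps 1 ++ [(rest.dropWhile (fun s => !qline s)).length]).map
                    (· + ((rest.takeWhile (fun s => !qline s)).length + 1))) := by
            rw [hnf, hpost]
            simp only [nf, hq, if_pos, List.map_cons, List.map_append, List.map_cons]
            rw [show (1 + (rest.takeWhile (fun s => !qline s)).length)
                  = (rest.takeWhile (fun s => !qline s)).length + 1 from by omega]
            rw [hshift, hklen, hpost]
            simp [List.length_cons]
          rw [List.tail_cons, hbounds]
          have hT : ((0 : Nat) :: nf ps 1 ++ [(rest.dropWhile (fun s => !qline s)).length]).map
                (· + ((rest.takeWhile (fun s => !qline s)).length + 1))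
              = ((rest.takeWhile (fun s => !qline s)).length + 1)
                :: ((nf ps 1 ++ [(rest.dropWhile (fun s => !qline s)).length]).map
                    (· + ((rest.takeWhile (fun s => !qline s)).length + 1))) := by
            simp
          rw [hT, natPayoff_cons, ← hT, payoff_shift]
          have hdrop : (l :: rest).drop ((rest.takeWhile (fun s => !qline s)).length + 1)
              = rest.dropWhile (fun s => !qline s) := by
            rw [List.drop_succ_cons]
            exact hdropKey _ rfl
          have htake : ((l :: rest).drop 0).take ((rest.takeWhile (fun s => !qline s)).length + 1 - 0)
              = l :: rest.takeWhile (fun s => !qline s) := by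
            simp only [List.drop_zero, Nat.sub_zero, List.take_succ_cons]
            rw [htakeKey _ rfl]
          have hpostlen : (rest.dropWhile (fun s => !qline s)).length ≤ n := by
            have h1 : (rest.dropWhile (fun s => !qline s)).length ≤ rest.length :=
              List.Sublist.length_le (List.dropWhile_sublist _)
            simp only [List.length_cons] at hlen
            omega
          have hih := ih (rest.dropWhile (fun s => !qline s)) hpostlen (by simp [hpost])
          rw [hdrop, htake]
          rw [hpost] at hih ⊢
          rw [List.tail_cons] at hih
          rw [hih, hchunks, hpost]
          simp

-- main A lemma: the accumulator fold yields the joined chunks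
theorem fold_eq_chunks (rest : List String) : ∀ (blocks cur : List String), cur ≠ [] →
    (let st := rest.foldl (fun (st : List String × List String) line =>
        if PySem.Str.startswith line "QUEUE:" && !st.2.isEmpty then
          (st.1 ++ [PySem.Str.join "\n" st.2], [line])
        else
          (st.1, st.2 ++ [line])) (blocks, cur)
      if st.2.isEmpty then st.1 else st.1 ++ [PySem.Str.join "\n" st.2])
      = blocks ++ (((cur ++ rest.takeWhile (fun s => !qline s))
            :: chunks (rest.dropWhile (fun s => !qline s))).map (PySem.Str.join "\n")) := by
  induction rest with
  | nil =>
      intro blocks cur h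
      simp only [List.foldl_nil, List.takeWhile_nil, List.dropWhile_nil, List.append_nil]
      rw [if_neg (by simpa [List.isEmpty_iff] using h)]
      simp [chunks]
  | cons r rs ih =>
      intro blocks cur h
      rw [List.foldl_cons]
      by_cases hq : qline r
      · have hcond : (PySem.Str.startswith r "QUEUE:" && !cur.isEmpty) = true := by
          have : cur.isEmpty = false := by simpa [List.isEmpty_iff] using h
          simp [this]
          exact hq
        simp only [hcond, if_pos]
        rw [ih (blocks ++ [PySem.Str.join "\n" cur]) [r] (by simp)]
        rw [List.takeWhile_cons_of_neg (by simp [hq]), List.dropWhile_cons_of_neg (by simp [hq])]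
        rw [chunks]
        simp
      · have hcond : (PySem.Str.startswith r "QUEUE:" && !cur.isEmpty) = false := by
          rw [show PySem.Str.startswith r "QUEUE:" = false from by simpa [qline] using hq]
          simp
        simp only [hcond, Bool.false_eq_true, if_false]
        rw [ih blocks (cur ++ [r]) (by simp)]
        rw [List.takeWhile_cons_of_pos (by simp [hq]), List.dropWhile_cons_of_pos (by simp [hq])]
        simp

theorem splitOn_go_ne_nil (sep : List Char) : ∀ (fuel : Nat) (l cur : List Char)
    (acc : List (List Char)), PySem.Chars.splitOn.go sep fuel l cur acc ≠ []
  | 0, l, cur, acc => by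
      rw [PySem.Chars.splitOn.go]
      simp
  | fuel + 1, [], cur, acc => by
      rw [PySem.Chars.splitOn.go]
      simp
      omega
  | fuel + 1, c :: rest, cur, acc => by
      rw [PySem.Chars.splitOn.go]
      by_cases hp : sep.isPrefixOf (c :: rest)
      · rw [if_pos hp]
        exact splitOn_go_ne_nil sep fuel _ _ _
      · rw [if_neg hp]
        exact splitOn_go_ne_nil sep fuel _ _ _

theorem split_ne_nil (s : String) :
    (PySem.Str.split? s "\n").getD [] ≠ [] := by
  have hb := PySem.Str.split?_map s "\n"
  cases hsp : PySem.Str.split? s "\n" with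
  | none =>
      rw [hsp] at hb
      simp [PySem.Chars.split?] at hb
  | some xs =>
      rw [hsp] at hb
      simp only [Option.map_some, PySem.Chars.split?] at hb
      rw [if_neg (by simp)] at hb
      have hxs : xs.map String.toList = PySem.Chars.splitOn s.toList "\n".toList :=
        Option.some_injective _ hb
      intro hnil
      simp only [Option.getD_some] at hnil
      rw [hnil] at hxs
      unfold PySem.Chars.splitOn at hxs
      exact splitOn_go_ne_nil _ _ _ _ _ (by simpa using hxs.symm)

-- the two programs agree on the (always non-empty) list of lines
theorem bodies_eq (lines : List String) (hne : lines ≠ []) :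
    (let st := lines.foldl (fun (st : List String × List String) line =>
        if PySem.Str.startswith line "QUEUE:" && !st.2.isEmpty then
          (st.1 ++ [PySem.Str.join "\n" st.2], [line])
        else
          (st.1, st.2 ++ [line])) (([], []) : List String × List String)
      if st.2.isEmpty then st.1 else st.1 ++ [PySem.Str.join "\n" st.2])
      = (((0 : Int) :: ((PySem.List.enumerate lines 0).filter
              (fun p => decide (0 < p.1) && PySem.Str.startswith p.2 "QUEUE:")).map (·.1)
            ++ [(lines.length : Int)]).zip
          (((0 : Int) :: ((PySem.List.enumerate lines 0).filter
              (fun p => decide (0 < p.1) && PySem.Str.startswith p.2 "QUEUE:")).map (·.1)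
            ++ [(lines.length : Int)]).tail)).map
          (fun p => PySem.Str.join "\n" (PySem.List.slice lines (some p.1) (some p.2))) := by
  obtain ⟨l, rest, rfl⟩ := List.exists_cons_of_ne_nil hne
  -- A side
  have hA : (let st := (l :: rest).foldl (fun (st : List String × List String) line =>
        if PySem.Str.startswith line "QUEUE:" && !st.2.isEmpty then
          (st.1 ++ [PySem.Str.join "\n" st.2], [line])
        else
          (st.1, st.2 ++ [line])) (([], []) : List String × List String)
      if st.2.isEmpty then st.1 else st.1 ++ [PySem.Str.join "\n" st.2])
      = (chunks (l :: rest)).map (PySem.Str.join "\n") := by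
    rw [List.foldl_cons]
    rw [show (if PySem.Str.startswith l "QUEUE:" && !(([], []) : List String × List String).2.isEmpty then
          ((([], []) : List String × List String).1 ++ [PySem.Str.join "\n" (([], []) : List String × List String).2], [l])
        else ((([], []) : List String × List String).1, (([], []) : List String × List String).2 ++ [l]))
        = (([], [l]) : List String × List String) from by simp]
    rw [fold_eq_chunks rest [] [l] (by simp)]
    rw [chunks]
    simp
  rw [hA]
  -- B side
  have hEnum : ((PySem.List.enumerate (l :: rest) 0).filter
        (fun p => decide (0 < p.1) && PySem.Str.startswith p.2 "QUEUE:")).map (·.1)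
      = (nf rest 1).map Int.ofNat := by
    rw [PySem.List.enumerate_cons, List.filter_cons]
    rw [if_neg (by simp)]
    rw [show (0 : Int) + 1 = ((1 : Nat) : Int) from by norm_num]
    exact enum_filter_eq_nf rest 1 le_rfl
  rw [hEnum]
  have hcastList : (0 : Int) :: (nf rest 1).map Int.ofNat ++ [((l :: rest).length : Int)]
      = ((0 :: nf rest 1 ++ [(l :: rest).length]).map Int.ofNat) := by
    simp [Int.ofNat_eq_natCast]
  rw [hcastList, payoff_cast]
  rw [show nf rest 1 = nf (l :: rest).tail 1 from rfl]
  exact (natPayoff_eq_chunks (l :: rest).length (l :: rest) le_rfl hne).symm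

set_option maxHeartbeats 1000000 in
theorem split_exception_blocks_py_spec : Claim_equal_split_exception_blocks_py := by
  intro content _
  unfold Spec_split_exception_blocks_py split_exception_blocks_py split_exception_blocks_py_alt
  exact bodies_eq _ (split_ne_nil _)
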